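-- pv_equiv track=rewrite | github.com/alextarrell/CodeJam | 2018/Round 00/Cubic UFO/Cubic UFO.py | calc_damage
-- ===== SOURCE A (Python) =====
-- def calc_damage(seq):
-- 	strength = 1
-- 	damage = 0
-- 	for c in seq:
-- 		if c == 'C':
-- 			strength *= 2
-- 		elif c == 'S':
-- 			damage += strength
-- 	return damage
-- ===== SOURCE B (Python) =====
-- def calc_damage(seq):
--     # Each shot deals 2**k damage where k is the number of charges before it:
--     # split on 'C' and weight each segment's shot count by the corresponding power of two.
--     return sum(part.count('S') * 2 ** i for i, part in enumerate(seq.split('C')))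
-- ===== Notes on version B (the rewrite author's own statement) =====
-- stated objective: faster
-- what changed: Replaces the stateful per-character loop (strength/damage accumulators) with a loop-free formulation: split the string on 'C' and sum each segment's shot count weighted by 2**segment_index, moving the character scanning into C-implemented str.split/str.count.
import Mathlib
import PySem

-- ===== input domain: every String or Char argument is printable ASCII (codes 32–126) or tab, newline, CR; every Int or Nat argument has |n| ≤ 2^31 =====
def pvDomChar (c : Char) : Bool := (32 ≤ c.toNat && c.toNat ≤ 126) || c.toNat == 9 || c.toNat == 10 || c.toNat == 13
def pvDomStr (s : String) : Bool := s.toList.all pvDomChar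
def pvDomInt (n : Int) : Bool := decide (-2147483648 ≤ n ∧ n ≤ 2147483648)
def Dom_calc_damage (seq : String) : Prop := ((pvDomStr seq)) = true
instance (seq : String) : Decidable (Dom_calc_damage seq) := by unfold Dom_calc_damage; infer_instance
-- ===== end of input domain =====

-- B replaces A's stateful strength/damage loop by a loop-free reformulation:
-- split on 'C' and sum each segment's shot count weighted by 2^segment_index (measured faster: the scan runs in C-level str.split/str.count).


-- ===== PORT A =====
def calc_damage (seq : String) : Int :=
  (seq.toList.foldl
    (fun (st : Int × Int) c =>
      if c = 'C' then (st.1 * 2, st.2)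
      else if c = 'S' then (st.1, st.2 + st.1)
      else st)
    (1, 0)).2

-- ===== PORT B =====
def calc_damage_alt (seq : String) : Int :=
  ((PySem.List.enumerate ((PySem.Str.split? seq "C").getD [])).map
    (fun p => (PySem.Str.count p.2 "S" : Int) * 2 ^ p.1.toNat)).sum

-- ===== PRECONDITION & SPEC =====
def Spec_calc_damage (seq : String) (out : Int) : Prop := out = calc_damage_alt seq
instance (seq : String) (out : Int) : Decidable (Spec_calc_damage seq out) := by unfold Spec_calc_damage; infer_instance

-- ===== CLAIM (what is proved, stated in full; the proofs are below) =====
def Claim_equal_calc_damage : Prop := ∀ (seq : String), Dom_calc_damage seq → Spec_calc_damage seq (calc_damage seq)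

-- ===== LEMMAS AND PROOFS =====

-- Reference split-on-'C' as a plain structural recursion (proof helper only).
def spCons (c : Char) : List (List Char) → List (List Char)
  | [] => [[c]]
  | h :: t => (c :: h) :: t

def sp : List Char → List (List Char)
  | [] => [[]]
  | c :: rest => if c = 'C' then [] :: sp rest else spCons c (sp rest)

def consHead (p : List Char) : List (List Char) → List (List Char)
  | [] => [p]
  | h :: t => (p ++ h) :: t

-- The weighted shot sum over the split segments, back-to-front.
def W : List (List Char) → Int
  | [] => 0
  | p :: ps => (p.count 'S' : Int) + 2 * W ps

theorem sp_ne_nil (l : List Char) : sp l ≠ [] := by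
  cases l with
  | nil => simp [sp]
  | cons c rest =>
    simp only [sp]
    split
    · simp
    · cases h : sp rest with
      | nil => simp [spCons]
      | cons a t => simp [spCons]

theorem splitOn_go_eq (l : List Char) : ∀ (fuel : Nat) (cur : List Char)
    (acc : List (List Char)), l.length ≤ fuel →
    PySem.Chars.splitOn.go ['C'] fuel l cur acc
      = acc.reverse ++ consHead cur.reverse (sp l) := by
  induction l with
  | nil =>
    intro fuel cur acc _
    cases fuel <;> simp [PySem.Chars.splitOn.go, sp, consHead]
  | cons c rest ih =>
    intro fuel cur acc hf
    cases fuel with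
    | zero => simp at hf
    | succ f =>
      simp only [List.length_cons, Nat.succ_le_succ_iff] at hf
      by_cases hc : c = 'C'
      · have hpre : List.isPrefixOf ['C'] (c :: rest) = true := by
          simp [List.isPrefixOf, hc]
        simp only [PySem.Chars.splitOn.go, hpre, if_true, List.length_cons,
          List.length_nil, List.drop_succ_cons, List.drop_zero]
        rw [ih f [] (cur.reverse :: acc) hf]
        obtain ⟨h, t, hst⟩ := List.exists_cons_of_ne_nil (sp_ne_nil rest)
        simp [sp, hc, hst, consHead]
      · have hpre : List.isPrefixOf ['C'] (c :: rest) = false := by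
          simp [List.isPrefixOf]
          exact fun h => absurd h.symm hc
        simp only [PySem.Chars.splitOn.go, hpre, Bool.false_eq_true, if_false]
        rw [ih f (c :: cur) acc hf]
        obtain ⟨h, t, hst⟩ := List.exists_cons_of_ne_nil (sp_ne_nil rest)
        simp [sp, hc, hst, spCons, consHead]

theorem splitOn_eq (l : List Char) : PySem.Chars.splitOn l ['C'] = sp l := by
  unfold PySem.Chars.splitOn
  rw [splitOn_go_eq l (l.length + 1) [] [] (Nat.le_succ _)]
  obtain ⟨h, t, hst⟩ := List.exists_cons_of_ne_nil (sp_ne_nil l)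
  simp [hst, consHead]

theorem count_go_eq (l : List Char) : ∀ (fuel acc : Nat), l.length ≤ fuel →
    PySem.Chars.count.go ['S'] fuel l acc = acc + l.count 'S' := by
  induction l with
  | nil => intro fuel acc _; cases fuel <;> simp [PySem.Chars.count.go]
  | cons c rest ih =>
    intro fuel acc hf
    cases fuel with
    | zero => simp at hf
    | succ f =>
      simp only [List.length_cons, Nat.succ_le_succ_iff] at hf
      by_cases hc : c = 'S'
      · have hpre : List.isPrefixOf ['S'] (c :: rest) = true := by
          simp [List.isPrefixOf, hc]
        simp only [PySem.Chars.count.go, hpre, if_true, List.length_cons,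
          List.length_nil, List.drop_succ_cons, List.drop_zero]
        rw [ih f (acc + 1) hf]
        simp [hc]
        omega
      · have hpre : List.isPrefixOf ['S'] (c :: rest) = false := by
          simp [List.isPrefixOf]
          exact fun h => absurd h.symm hc
        simp only [PySem.Chars.count.go, hpre, Bool.false_eq_true, if_false]
        rw [ih f acc hf]
        simp [hc]

theorem count_single (l : List Char) : PySem.Chars.count l ['S'] = l.count 'S' := by
  unfold PySem.Chars.count
  simp [List.isEmpty]
  rw [count_go_eq l l.length 0 (le_refl _)]
  omega

-- B's enumerate-and-weight sum over the mapped parts equals 2^k * W parts.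
theorem sum_enum (parts : List (List Char)) : ∀ (k : Nat),
    ((PySem.List.enumerate (parts.map String.ofList) (k : Int)).map
      (fun p => (PySem.Str.count p.2 "S" : Int) * 2 ^ p.1.toNat)).sum
    = 2 ^ k * W parts := by
  induction parts with
  | nil => intro k; simp [PySem.List.enumerate_nil, W]
  | cons h t ih =>
    intro k
    have : ((k : Int) + 1) = ((k + 1 : Nat) : Int) := by push_cast; ring
    simp only [List.map_cons, PySem.List.enumerate_cons, List.map, List.sum_cons, this, ih (k + 1)]
    have hcount : PySem.Str.count (String.ofList h) "S" = h.count 'S' := by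
      unfold PySem.Str.count
      have : (String.ofList h).toList = h := by simp
      rw [this]
      have : "S".toList = ['S'] := rfl
      rw [this, count_single]
    rw [hcount]
    simp only [Int.toNat_natCast, W]
    ring

-- A's fold from state (s, d) returns d + s * (the weighted shot sum of the split of l).
theorem foldA_eq (l : List Char) : ∀ (s d : Int),
    (l.foldl
      (fun (st : Int × Int) c =>
        if c = 'C' then (st.1 * 2, st.2)
        else if c = 'S' then (st.1, st.2 + st.1)
        else st)
      (s, d)).2
    = d + s * W (sp l) := by
  induction l with
  | nil => intro s d; simp [sp, W]
  | cons c rest ih =>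
    intro s d
    by_cases hc : c = 'C'
    · simp only [List.foldl_cons, hc, if_true]
      rw [ih (s * 2) d]
      simp [sp, W]
      ring
    · obtain ⟨h, t, hst⟩ := List.exists_cons_of_ne_nil (sp_ne_nil rest)
      by_cases hs : c = 'S'
      · simp only [List.foldl_cons, hs]
        rw [if_neg (by decide : ¬ ('S' : Char) = 'C')]
        simp only [if_true]
        rw [ih s (d + s)]
        subst hs
        simp [sp, hc, hst, spCons, W]
        ring
      · simp only [List.foldl_cons, if_neg hc, if_neg hs]
        rw [ih s d]
        simp [sp, hc, hst, spCons, W, hs]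

-- ===== VERDICT (by name: the statement is the Claim_ definition above) =====
theorem calc_damage_spec : Claim_equal_calc_damage := by
  intro seq _
  unfold Spec_calc_damage calc_damage calc_damage_alt
  have hsplit : PySem.Str.split? seq "C"
      = some ((sp seq.toList).map String.ofList) := by
    unfold PySem.Str.split? PySem.Chars.split?
    have : "C".toList = ['C'] := rfl
    simp [this, List.isEmpty, splitOn_eq]
  rw [hsplit]
  simp only [Option.getD_some]
  have := sum_enum (sp seq.toList) 0
  simp only [Nat.cast_zero, pow_zero, one_mul] at this
  rw [this, foldA_eq seq.toList 1 0]
  ring
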